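-- pv_equiv track=rewrite | github.com/Gitzman/chain-of-table-BAML | operations/sort_by.py | only_keep_num_and_first_dot
-- ===== SOURCE A (Python) =====
-- def only_keep_num_and_first_dot(s):
--     if s.strip() and s.strip()[0] == "-":
--         minus = True
--     else:
--         minus = False
--     ns = ""
--     dot = False
--     for c in s:
--         if c in "0123456789":
--             ns += c
--         if c == ".":
--             if dot == False:
--                 ns += c
--                 dot = True
--     if ns == ".":
--         return ""
--     if ns == "":
--         return ""
--     if minus:
--         ns = "-" + ns
--     return ns
-- ===== SOURCE B (Python) =====
-- def only_keep_num_and_first_dot(s):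
--     t = s.strip()
--     minus = bool(t) and t[0] == "-"
--     head, sep, tail = s.partition(".")
--     ns = "".join(c for c in head if c.isdigit()) + sep + "".join(c for c in tail if c.isdigit())
--     if ns in ("", "."):
--         return ""
--     return "-" + ns if minus else ns
-- ===== Notes on version B (the rewrite author's own statement) =====
-- stated objective: simpler
-- what changed: Replaces the single stateful scan carrying a dot-seen flag with a partition on the first dot plus two digit filters, re-adding the dot only when a separator was found.
import Mathlib
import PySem

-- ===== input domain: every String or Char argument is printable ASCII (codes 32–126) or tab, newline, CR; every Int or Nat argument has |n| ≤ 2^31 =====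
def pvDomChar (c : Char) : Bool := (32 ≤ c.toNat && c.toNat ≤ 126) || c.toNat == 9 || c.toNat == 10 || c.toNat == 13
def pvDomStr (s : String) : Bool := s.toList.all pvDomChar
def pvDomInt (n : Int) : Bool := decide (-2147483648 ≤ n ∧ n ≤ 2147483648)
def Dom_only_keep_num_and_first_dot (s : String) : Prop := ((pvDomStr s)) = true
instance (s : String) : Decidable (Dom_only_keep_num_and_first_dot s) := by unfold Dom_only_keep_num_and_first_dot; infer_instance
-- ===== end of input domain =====

-- B partitions on the first dot and filters digits of each side instead of A's single stateful scan; simpler.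

-- ===== PORT A =====
-- the literal "0123456789" of A's membership test
def pvDigits : List Char := ['0','1','2','3','4','5','6','7','8','9']

-- one iteration of A's for-loop: state is (ns, dot)
def pvAStep (st : List Char × Bool) (c : Char) : List Char × Bool :=
  let st1 := if c ∈ pvDigits then (st.1 ++ [c], st.2) else st
  if c = '.' then (if st1.2 = false then (st1.1 ++ ['.'], true) else st1) else st1

def only_keep_num_and_first_dot (s : String) : String :=
  let minus : Bool :=
    match (PySem.Str.strip s).toList with
    | c :: _ => c == '-'
    | [] => false
  let ns := (s.toList.foldl pvAStep ([], false)).1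
  if ns = ['.'] then ""
  else if ns = [] then ""
  else if minus then String.mk ('-' :: ns) else String.mk ns

-- ===== PORT B =====
def only_keep_num_and_first_dot_alt (s : String) : String :=
  let minus : Bool :=
    match (PySem.Str.strip s).toList with
    | c :: _ => c == '-'
    | [] => false
  let cs := s.toList
  -- head, sep, tail = s.partition(".")
  let head := cs.takeWhile (· ≠ '.')
  let hasDot := cs.any (· == '.')
  let tail := if hasDot then (cs.dropWhile (· ≠ '.')).tail else []
  let ns := head.filter PySem.Chars.isdigit
            ++ (if hasDot then ['.'] else [])
            ++ tail.filter PySem.Chars.isdigit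
  if ns = [] ∨ ns = ['.'] then ""
  else if minus then String.mk ('-' :: ns) else String.mk ns

-- ===== PRECONDITION & SPEC =====
def Spec_only_keep_num_and_first_dot (s : String) (out : String) : Prop := out = only_keep_num_and_first_dot_alt s
instance (s : String) (out : String) : Decidable (Spec_only_keep_num_and_first_dot s out) := by unfold Spec_only_keep_num_and_first_dot; infer_instance

-- ===== CLAIM (what is proved, stated in full; the proofs are below) =====
def Claim_equal_only_keep_num_and_first_dot : Prop := ∀ (s : String), Dom_only_keep_num_and_first_dot s → Spec_only_keep_num_and_first_dot s (only_keep_num_and_first_dot s)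

-- ===== LEMMAS AND PROOFS =====

-- A's digit test agrees with Python's str.isdigit on every Char
lemma mem_pvDigits_iff (c : Char) : (c ∈ pvDigits) ↔ PySem.Chars.isdigit c = true := by
  unfold pvDigits PySem.Chars.isdigit
  have h0 : '0'.val.toNat = 48 := rfl
  have h1 : '1'.val.toNat = 49 := rfl
  have h2 : '2'.val.toNat = 50 := rfl
  have h3 : '3'.val.toNat = 51 := rfl
  have h4 : '4'.val.toNat = 52 := rfl
  have h5 : '5'.val.toNat = 53 := rfl
  have h6 : '6'.val.toNat = 54 := rfl
  have h7 : '7'.val.toNat = 55 := rfl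
  have h8 : '8'.val.toNat = 56 := rfl
  have h9 : '9'.val.toNat = 57 := rfl
  simp only [List.mem_cons, List.not_mem_nil, or_false, Bool.and_eq_true, decide_eq_true_eq,
    Char.ext_iff, Char.le_def, UInt32.le_iff_toNat_le, UInt32.toNat_inj.symm]
  omega

lemma pvAStep_true (acc : List Char) (c : Char) :
    pvAStep (acc, true) c = ((if c ∈ pvDigits then acc ++ [c] else acc), true) := by
  simp only [pvAStep]
  split_ifs <;> simp_all

lemma dot_not_digit : ('.' ∈ pvDigits) = False := by decide

lemma pvAStep_false (acc : List Char) (c : Char) :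
    pvAStep (acc, false) c =
      if c = '.' then (acc ++ ['.'], true)
      else ((if c ∈ pvDigits then acc ++ [c] else acc), false) := by
  simp only [pvAStep]
  by_cases hd : c = '.'
  · subst hd; simp [dot_not_digit]
  · split_ifs <;> simp_all

-- once dot is seen, A's loop just appends the remaining digits
lemma foldl_pvAStep_true (cs : List Char) (acc : List Char) :
    (cs.foldl pvAStep (acc, true)).1 = acc ++ cs.filter PySem.Chars.isdigit := by
  induction cs generalizing acc with
  | nil => simp
  | cons c cs ih =>
    rw [List.foldl_cons, pvAStep_true, ih]
    by_cases hd : PySem.Chars.isdigit c = true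
    · simp [(mem_pvDigits_iff c).2 hd, hd]
    · rw [if_neg (fun h => hd ((mem_pvDigits_iff c).1 h))]
      simp [hd]

-- before the dot, A's loop builds digits-of-head, then the dot, then digits-of-tail
lemma foldl_pvAStep_false (cs : List Char) (acc : List Char) :
    (cs.foldl pvAStep (acc, false)).1 =
      acc ++ (cs.takeWhile (· ≠ '.')).filter PySem.Chars.isdigit
          ++ (if cs.any (· == '.') then
                '.' :: ((cs.dropWhile (· ≠ '.')).tail.filter PySem.Chars.isdigit)
              else []) := by
  induction cs generalizing acc with
  | nil => simp
  | cons c cs ih =>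
    by_cases hdot : c = '.'
    · subst hdot
      rw [List.foldl_cons, pvAStep_false, if_pos rfl, foldl_pvAStep_true]
      simp [List.dropWhile_cons]
    · rw [List.foldl_cons, pvAStep_false, if_neg hdot]
      by_cases hd : PySem.Chars.isdigit c = true
      · rw [if_pos ((mem_pvDigits_iff c).2 hd), ih]
        simp [hdot, hd]
      · rw [if_neg (fun h => hd ((mem_pvDigits_iff c).1 h)), ih]
        simp [hdot, hd]

-- ===== VERDICT (by name: the statement is the Claim_ definition above) =====
theorem only_keep_num_and_first_dot_spec : Claim_equal_only_keep_num_and_first_dot := by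
  intro s _
  unfold Spec_only_keep_num_and_first_dot only_keep_num_and_first_dot only_keep_num_and_first_dot_alt
  rw [foldl_pvAStep_false]
  have guards : ∀ (ns : List Char) (minus : Bool),
      (if ns = ['.'] then "" else if ns = [] then ""
       else if minus then String.mk ('-' :: ns) else String.mk ns)
      = (if ns = [] ∨ ns = ['.'] then ""
         else if minus then String.mk ('-' :: ns) else String.mk ns) := by
    intro ns minus
    split_ifs <;> simp_all
  rcases Bool.eq_false_or_eq_true (s.toList.any (· == '.')) with h | h <;>
    simp only [h, Bool.false_eq_true, if_true, if_false, List.nil_append, List.append_nil,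
      List.filter_nil, List.append_assoc, List.singleton_append] <;>
    exact guards _ _
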